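-- pv_equiv track=rewrite | github.com/BeauSaunders/LeetCodeSolutions | [800-999]/[819] Most Common Word.py | cleanParagraph
-- ===== SOURCE A (Python) =====
-- def cleanParagraph(paragraph: str) -> []:
--     result = ['']
--
--     i = 0
--     wasLastSpace = False
--     for letter in paragraph:
--         # if a non-letter (e.g. space or punctuation)
--         if letter.isalpha() is False:
--             # if was a space or punctuation last time, don't increment
--             if wasLastSpace:
--                 continue
--
--             # else increment the list
--             i = i + 1
--             result.append('')
--             wasLastSpace = True
--         # else it is a letter
--         else:
--             result[i] += letter.lower()
--             wasLastSpace = False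
--
--     return result
-- ===== SOURCE B (Python) =====
-- from itertools import groupby
--
-- def cleanParagraph(paragraph: str) -> []:
--     result = ['']
--     for is_alpha, group in groupby(paragraph, key=str.isalpha):
--         if is_alpha:
--             result[-1] = ''.join(c.lower() for c in group)
--         else:
--             result.append('')
--     return result
-- ===== Notes on version B (the rewrite author's own statement) =====
-- stated objective: idiomatic
-- what changed: Replaces A's char-by-char state machine (manual index i and wasLastSpace flag) with an itertools.groupby pass over maximal alpha/non-alpha runs: each alpha run becomes the last word via one join, each delimiter run appends one empty slot.
import Mathlib
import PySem

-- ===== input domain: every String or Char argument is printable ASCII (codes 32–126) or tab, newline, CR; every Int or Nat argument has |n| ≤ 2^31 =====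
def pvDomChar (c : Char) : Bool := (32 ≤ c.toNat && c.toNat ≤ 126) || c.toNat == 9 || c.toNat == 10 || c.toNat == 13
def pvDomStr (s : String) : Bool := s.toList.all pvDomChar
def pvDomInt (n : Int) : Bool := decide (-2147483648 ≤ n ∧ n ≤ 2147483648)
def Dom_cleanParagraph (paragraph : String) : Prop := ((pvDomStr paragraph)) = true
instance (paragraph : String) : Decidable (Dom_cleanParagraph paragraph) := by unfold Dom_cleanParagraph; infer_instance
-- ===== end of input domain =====

-- B replaces A's char-by-char state machine (index + wasLastSpace flag) by an itertools.groupby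
-- pass over alternating alpha/non-alpha runs, joining each alpha run once; objective: idiomatic
-- (and measured faster: A's result[i] += letter re-copies the growing word on every char).


-- ===== PORT A =====
-- one loop step of A: state (result, i, wasLastSpace); result[i] += letter.lower() is a modify at i
def pvStepA (st : List (List Char) × Nat × Bool) (c : Char) : List (List Char) × Nat × Bool :=
  if PySem.Chars.isalpha c = false then
    if st.2.2 then st
    else (st.1 ++ [[]], st.2.1 + 1, true)
  else (st.1.modify st.2.1 (fun s => s ++ [PySem.Chars.lowerChar c]), st.2.1, false)

def cleanParagraph (paragraph : String) : List String :=
  ((paragraph.toList.foldl pvStepA ([[]], 0, false)).1).map String.ofList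

-- ===== PORT B =====
-- itertools.groupby(paragraph, key=str.isalpha): maximal runs of chars sharing the isalpha key
def pvRuns : List Char → List (Bool × List Char)
  | [] => []
  | c :: cs =>
    (PySem.Chars.isalpha c,
      c :: cs.takeWhile (fun d => PySem.Chars.isalpha d == PySem.Chars.isalpha c)) ::
    pvRuns (cs.dropWhile (fun d => PySem.Chars.isalpha d == PySem.Chars.isalpha c))
  termination_by l => l.length
  decreasing_by simpa using Nat.lt_succ_of_le (List.length_dropWhile_le _ cs)

-- one loop step of B; result kept head-first (reversed): result[-1] = join(...) replaces the head, append('') conses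
def pvStepB (acc : List (List Char)) (bg : Bool × List Char) : List (List Char) :=
  if bg.1 then bg.2.map PySem.Chars.lowerChar :: acc.tail else [] :: acc

def cleanParagraph_alt (paragraph : String) : List String :=
  (((pvRuns paragraph.toList).foldl pvStepB [[]]).reverse).map String.ofList

-- ===== PRECONDITION & SPEC =====
def Spec_cleanParagraph (paragraph : String) (out : List String) : Prop := out = cleanParagraph_alt paragraph
instance (paragraph : String) (out : List String) : Decidable (Spec_cleanParagraph paragraph out) := by unfold Spec_cleanParagraph; infer_instance

-- ===== CLAIM (what is proved, stated in full; the proofs are below) =====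
def Claim_equal_cleanParagraph : Prop := ∀ (paragraph : String), Dom_cleanParagraph paragraph → Spec_cleanParagraph paragraph (cleanParagraph paragraph)

-- ===== LEMMAS AND PROOFS =====

-- reference recursion: the list A's loop produces from current word `cur` and flag `w` on input `cs`
def pvH (cur : List Char) (w : Bool) : List Char → List (List Char)
  | [] => [cur]
  | c :: cs =>
    if PySem.Chars.isalpha c then pvH (cur ++ [PySem.Chars.lowerChar c]) false cs
    else if w then pvH cur true cs
    else cur :: pvH [] true cs

theorem pv_modify_last (res : List (List Char)) (f : List Char → List Char) (h : res ≠ []) :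
    res.modify (res.length - 1) f = res.dropLast ++ [f (res.getLast h)] := by
  induction res with
  | nil => exact absurd rfl h
  | cons x t ih =>
    cases t with
    | nil => simp [List.modify]
    | cons y t' =>
      have := ih (by simp)
      simp only [List.length_cons, Nat.add_sub_cancel] at this ⊢
      simpa [List.modify, List.getLast, Nat.succ_sub_one] using this

theorem pv_foldA (cs : List Char) : ∀ (res : List (List Char)) (w : Bool) (h : res ≠ []),
    (cs.foldl pvStepA (res, res.length - 1, w)).1 = res.dropLast ++ pvH (res.getLast h) w cs := by
  induction cs with
  | nil =>
    intro res w h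
    simp only [List.foldl_nil, pvH]
    exact (List.dropLast_concat_getLast h).symm
  | cons c cs ih =>
    intro res w h
    by_cases ha : PySem.Chars.isalpha c = true
    · have hm := pv_modify_last res (fun s => s ++ [PySem.Chars.lowerChar c]) h
      have hne : res.dropLast ++ [res.getLast h ++ [PySem.Chars.lowerChar c]] ≠ [] := by simp
      have hlen : (res.dropLast ++ [res.getLast h ++ [PySem.Chars.lowerChar c]]).length - 1
          = res.length - 1 := by
        have : 1 ≤ res.length := List.length_pos_iff.mpr h
        simp [List.length_dropLast]
      have hstep : pvStepA (res, res.length - 1, w) c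
          = (res.dropLast ++ [res.getLast h ++ [PySem.Chars.lowerChar c]], res.length - 1, false) := by
        simp [pvStepA, ha, hm]
      have hrec := ih (res.dropLast ++ [res.getLast h ++ [PySem.Chars.lowerChar c]]) false hne
      rw [hlen] at hrec
      rw [List.foldl_cons, hstep, hrec, List.dropLast_concat]
      have hgl : (res.dropLast ++ [res.getLast h ++ [PySem.Chars.lowerChar c]]).getLast hne
          = res.getLast h ++ [PySem.Chars.lowerChar c] := List.getLast_concat
      rw [hgl, show pvH (res.getLast h) w (c :: cs)
          = pvH (res.getLast h ++ [PySem.Chars.lowerChar c]) false cs from by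
        simp only [pvH]; rw [if_pos ha]]
    · simp only [Bool.not_eq_true] at ha
      cases w with
      | true =>
        have hstep : pvStepA (res, res.length - 1, true) c = (res, res.length - 1, true) := by
          simp [pvStepA, ha]
        rw [List.foldl_cons, hstep, ih res true h,
          show pvH (res.getLast h) true (c :: cs) = pvH (res.getLast h) true cs from by
            simp [pvH, ha]]
      | false =>
        have hne : res ++ [([] : List Char)] ≠ [] := by simp
        have hlen : (res ++ [([] : List Char)]).length - 1 = res.length - 1 + 1 := by
          have : 1 ≤ res.length := List.length_pos_iff.mpr h
          simp; omega
        have hstep : pvStepA (res, res.length - 1, false) c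
            = (res ++ [[]], res.length - 1 + 1, true) := by
          simp [pvStepA, ha]
        have hrec := ih (res ++ [[]]) true hne
        rw [hlen] at hrec
        rw [List.foldl_cons, hstep, hrec, List.dropLast_concat,
          show (res ++ [([] : List Char)]).getLast hne = [] from List.getLast_concat,
          show pvH (res.getLast h) false (c :: cs) = res.getLast h :: pvH [] true cs from by
            simp [pvH, ha]]
        conv_lhs => rw [← List.dropLast_concat_getLast h]
        simp

-- pvH consumes an all-alpha run as one appended, lowered block
theorem pv_H_alpha (g : List Char) : ∀ (cur : List Char) (cs : List Char),
    (∀ c ∈ g, PySem.Chars.isalpha c = true) →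
    pvH cur false (g ++ cs) = pvH (cur ++ g.map PySem.Chars.lowerChar) false cs := by
  induction g with
  | nil => intro cur cs _; simp
  | cons c g ih =>
    intro cur cs hg
    have hc := hg c (by simp)
    simp only [List.cons_append, pvH, hc, List.map_cons, if_true]
    rw [ih (cur ++ [PySem.Chars.lowerChar c]) cs (fun d hd => hg d (by simp [hd]))]
    simp

-- with wasLastSpace set, pvH skips a non-alpha run
theorem pv_H_skip (g : List Char) : ∀ (cur : List Char) (cs : List Char),
    (∀ c ∈ g, PySem.Chars.isalpha c = false) →
    pvH cur true (g ++ cs) = pvH cur true cs := by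
  induction g with
  | nil => intro _ _ _; simp
  | cons c g ih =>
    intro cur cs hg
    have hc := hg c (by simp)
    simp only [List.cons_append, pvH, hc, Bool.false_eq_true, if_false, if_true]
    exact ih cur cs (fun d hd => hg d (by simp [hd]))

-- the flag is irrelevant when the next char (if any) is alphabetic
theorem pv_H_true_false (cur : List Char) (cs : List Char)
    (h : ∀ d, cs.head? = some d → PySem.Chars.isalpha d = true) :
    pvH cur true cs = pvH cur false cs := by
  cases cs with
  | nil => rfl
  | cons d t => simp [pvH, h d rfl]

theorem pv_foldB (n : Nat) : ∀ (cs : List Char), cs.length ≤ n → ∀ (acc : List (List Char)),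
    (pvRuns cs).foldl pvStepB ([] :: acc) = (pvH [] false cs).reverse ++ acc := by
  induction n with
  | zero =>
    intro cs hcs acc
    have : cs = [] := List.length_eq_zero_iff.mp (Nat.le_zero.mp hcs)
    subst this; simp [pvRuns, pvH]
  | succ n ih =>
    intro cs hcs acc
    cases cs with
    | nil => simp [pvRuns, pvH]
    | cons c cs' =>
      have hsplit : cs'.takeWhile (fun d => PySem.Chars.isalpha d == PySem.Chars.isalpha c)
          ++ cs'.dropWhile (fun d => PySem.Chars.isalpha d == PySem.Chars.isalpha c) = cs' :=
        List.takeWhile_append_dropWhile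
      have htake : ∀ d ∈ cs'.takeWhile (fun d => PySem.Chars.isalpha d == PySem.Chars.isalpha c),
          PySem.Chars.isalpha d = PySem.Chars.isalpha c := by
        intro d hd
        simpa using List.mem_takeWhile_imp hd
      have hdroph : ∀ d,
          (cs'.dropWhile (fun d => PySem.Chars.isalpha d == PySem.Chars.isalpha c)).head? = some d →
          PySem.Chars.isalpha d = !(PySem.Chars.isalpha c) := by
        intro d hd
        have := List.head?_dropWhile_not
          (fun d => PySem.Chars.isalpha d == PySem.Chars.isalpha c) cs'
        rw [hd] at this
        simpa [Bool.eq_not_iff] using this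
      have hlen : (cs'.dropWhile (fun d => PySem.Chars.isalpha d == PySem.Chars.isalpha c)).length
          ≤ n := by
        have := List.length_dropWhile_le
          (fun d => PySem.Chars.isalpha d == PySem.Chars.isalpha c) cs'
        simp at hcs; omega
      rw [show pvRuns (c :: cs')
            = (PySem.Chars.isalpha c,
                c :: cs'.takeWhile (fun d => PySem.Chars.isalpha d == PySem.Chars.isalpha c)) ::
              pvRuns (cs'.dropWhile (fun d => PySem.Chars.isalpha d == PySem.Chars.isalpha c))
          from by rw [pvRuns]]
      by_cases hb : PySem.Chars.isalpha c = true
      · -- alpha run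
        have hstep : pvStepB ([] :: acc)
            (PySem.Chars.isalpha c,
              c :: cs'.takeWhile (fun d => PySem.Chars.isalpha d == PySem.Chars.isalpha c))
            = (c :: cs'.takeWhile (fun d => PySem.Chars.isalpha d == PySem.Chars.isalpha c)).map
                PySem.Chars.lowerChar :: acc := by
          simp [pvStepB, hb]
        have hH : pvH [] false (c :: cs')
            = pvH ((c :: cs'.takeWhile (fun d => PySem.Chars.isalpha d == PySem.Chars.isalpha c)).map
                PySem.Chars.lowerChar) false
              (cs'.dropWhile (fun d => PySem.Chars.isalpha d == PySem.Chars.isalpha c)) := by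
          conv_lhs => rw [show c :: cs'
              = (c :: cs'.takeWhile (fun d => PySem.Chars.isalpha d == PySem.Chars.isalpha c))
                ++ cs'.dropWhile (fun d => PySem.Chars.isalpha d == PySem.Chars.isalpha c) from by
            simp [hsplit]]
          have := pv_H_alpha
            (c :: cs'.takeWhile (fun d => PySem.Chars.isalpha d == PySem.Chars.isalpha c)) []
            (cs'.dropWhile (fun d => PySem.Chars.isalpha d == PySem.Chars.isalpha c)) (by
              intro d hd
              rcases List.mem_cons.mp hd with h1 | h1
              · subst h1; exact hb
              · rw [htake d h1, hb])
          simpa using this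
        rw [List.foldl_cons, hstep]
        rcases hrest : cs'.dropWhile (fun d => PySem.Chars.isalpha d == PySem.Chars.isalpha c)
          with _ | ⟨d, rest0⟩
        · rw [hH, hrest]
          simp [pvRuns, pvH]
        · have hd : PySem.Chars.isalpha d = false := by
            have := hdroph d (by rw [hrest]; rfl)
            simpa [hb] using this
          have hsplit2 : rest0.takeWhile (fun e => PySem.Chars.isalpha e == PySem.Chars.isalpha d)
              ++ rest0.dropWhile (fun e => PySem.Chars.isalpha e == PySem.Chars.isalpha d)
              = rest0 := List.takeWhile_append_dropWhile
          have htake2 : ∀ e ∈ rest0.takeWhile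
              (fun e => PySem.Chars.isalpha e == PySem.Chars.isalpha d),
              PySem.Chars.isalpha e = false := by
            intro e he
            have := List.mem_takeWhile_imp he
            simp only [hd, beq_iff_eq] at this
            exact this
          have hdrop2 : ∀ e, (rest0.dropWhile
              (fun e => PySem.Chars.isalpha e == PySem.Chars.isalpha d)).head? = some e →
              PySem.Chars.isalpha e = true := by
            intro e he
            have := List.head?_dropWhile_not
              (fun e => PySem.Chars.isalpha e == PySem.Chars.isalpha d) rest0
            rw [he] at this
            simp only [hd, beq_eq_false_iff_ne, ne_eq] at this
            simpa using this
          have hlen2 : (rest0.dropWhile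
              (fun e => PySem.Chars.isalpha e == PySem.Chars.isalpha d)).length ≤ n := by
            have h1 := List.length_dropWhile_le
              (fun e => PySem.Chars.isalpha e == PySem.Chars.isalpha d) rest0
            have h2 := List.length_dropWhile_le
              (fun d => PySem.Chars.isalpha d == PySem.Chars.isalpha c) cs'
            rw [hrest] at h2
            simp at hcs h2; omega
          rw [show pvRuns (d :: rest0)
                = (PySem.Chars.isalpha d,
                    d :: rest0.takeWhile (fun e => PySem.Chars.isalpha e == PySem.Chars.isalpha d)) ::
                  pvRuns (rest0.dropWhile (fun e => PySem.Chars.isalpha e == PySem.Chars.isalpha d))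
              from by rw [pvRuns]]
          rw [List.foldl_cons, show pvStepB
              ((c :: cs'.takeWhile (fun d => PySem.Chars.isalpha d == PySem.Chars.isalpha c)).map
                PySem.Chars.lowerChar :: acc)
              (PySem.Chars.isalpha d,
                d :: rest0.takeWhile (fun e => PySem.Chars.isalpha e == PySem.Chars.isalpha d))
              = [] :: (c :: cs'.takeWhile (fun d => PySem.Chars.isalpha d == PySem.Chars.isalpha c)).map
                  PySem.Chars.lowerChar :: acc from by simp [pvStepB, hd]]
          rw [hrest] at hH
          rw [ih _ hlen2 _, hH,
            show pvH ((c :: cs'.takeWhile (fun d => PySem.Chars.isalpha d == PySem.Chars.isalpha c)).map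
                PySem.Chars.lowerChar) false (d :: rest0)
              = (c :: cs'.takeWhile (fun d => PySem.Chars.isalpha d == PySem.Chars.isalpha c)).map
                  PySem.Chars.lowerChar ::
                pvH [] false (rest0.dropWhile
                  (fun e => PySem.Chars.isalpha e == PySem.Chars.isalpha d)) from by
              simp only [pvH]
              rw [if_neg (by simp [hd])]
              simp only [Bool.false_eq_true, if_false]
              congr 1
              conv_lhs => rw [← hsplit2]
              rw [pv_H_skip _ [] _ htake2]
              exact pv_H_true_false [] _ hdrop2]
          simp
      · -- non-alpha run
        simp only [Bool.not_eq_true] at hb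
        rw [List.foldl_cons, show pvStepB ([] :: acc)
            (PySem.Chars.isalpha c,
              c :: cs'.takeWhile (fun d => PySem.Chars.isalpha d == PySem.Chars.isalpha c))
            = [] :: [] :: acc from by simp [pvStepB, hb]]
        rw [ih _ hlen ([] :: acc),
          show pvH [] false (c :: cs')
            = [] :: pvH [] false (cs'.dropWhile
                (fun d => PySem.Chars.isalpha d == PySem.Chars.isalpha c)) from by
            simp only [pvH]
            rw [if_neg (by simp [hb])]
            simp only [Bool.false_eq_true, if_false]
            congr 1
            conv_lhs => rw [← hsplit]
            rw [pv_H_skip _ [] _ (by intro d hd; rw [htake d hd, hb])]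
            exact pv_H_true_false [] _ (by
              intro d hd
              have := hdroph d hd
              simpa [hb] using this)]
        simp

-- ===== VERDICT (by name: the statement is the Claim_ definition above) =====
theorem cleanParagraph_spec : Claim_equal_cleanParagraph := by
  intro p _
  show cleanParagraph p = cleanParagraph_alt p
  unfold cleanParagraph cleanParagraph_alt
  have hA := pv_foldA p.toList [[]] false (by simp)
  have hB := pv_foldB p.toList.length p.toList le_rfl []
  simp only [List.length_cons, List.length_nil, Nat.add_sub_cancel] at hA
  rw [hA, hB]
  simp [List.getLast]
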